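-- pv_equiv track=rewrite | github.com/alokbehera447/Danieli_corus_new_backend | planner/modules/edges.py | y_edges_process
-- ===== SOURCE A (Python) =====
-- def y_edges_process(y_edges):
--     best_by_xy = {}
--
--     for line in y_edges:
--         p1, p2 = line
--
--         # Create sorted keys for x and y so order of points does not matter
--         x_key = tuple(sorted([p1[0], p2[0]]))
--         y_key = tuple(sorted([p1[1], p2[1]]))
--
--         # Combined unique key
--         key = (x_key, y_key)
--
--         # Compare using max Z value of the line
--         max_z = max(p1[2], p2[2])
--
--         # Store the line with highest Z for this (x,y) key
--         if key not in best_by_xy or max_z > best_by_xy[key][0]: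
--             best_by_xy[key] = (max_z, line)
--
--     # Return only the selected lines
--     return [item[1] for item in best_by_xy.values()]
-- ===== SOURCE B (Python) =====
-- def y_edges_process(y_edges):
--     # Group lines by their unordered (x-pair, y-pair) key, then pick the
--     # first line with maximal z from each bucket (dict keeps first-appearance order).
--     groups = {}
--     for line in y_edges:
--         p1, p2 = line
--         key = (tuple(sorted([p1[0], p2[0]])), tuple(sorted([p1[1], p2[1]])))
--         groups.setdefault(key, []).append(line)
--     return [max(bucket, key=lambda l: max(l[0][2], l[1][2]))
--             for bucket in groups.values()]
-- ===== Notes on version B (the rewrite author's own statement) =====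
-- stated objective: alternative
-- what changed: Replaces the single-pass running-best dict (compare-and-overwrite per line) with a group-then-reduce: one pass buckets lines by their unordered (x-pair, y-pair) key, a second pass takes the first z-maximal line of each bucket with max(key=...).
import Mathlib
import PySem

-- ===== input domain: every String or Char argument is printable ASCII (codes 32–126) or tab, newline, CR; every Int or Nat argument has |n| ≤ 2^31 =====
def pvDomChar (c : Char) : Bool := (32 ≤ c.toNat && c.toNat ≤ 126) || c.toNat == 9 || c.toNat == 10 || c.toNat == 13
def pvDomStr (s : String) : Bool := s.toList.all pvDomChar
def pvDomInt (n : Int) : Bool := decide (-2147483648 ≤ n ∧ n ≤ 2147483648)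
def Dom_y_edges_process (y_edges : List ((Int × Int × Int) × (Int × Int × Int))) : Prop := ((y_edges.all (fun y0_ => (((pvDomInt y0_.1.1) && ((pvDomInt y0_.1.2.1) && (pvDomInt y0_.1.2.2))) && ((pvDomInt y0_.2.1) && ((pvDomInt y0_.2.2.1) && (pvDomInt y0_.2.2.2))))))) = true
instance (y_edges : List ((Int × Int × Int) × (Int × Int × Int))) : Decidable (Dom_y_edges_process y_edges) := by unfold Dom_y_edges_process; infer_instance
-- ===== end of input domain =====

-- B replaces A's single-pass running-best dict with a group-by-key pass followed by a per-bucket first-maximum pick (alternative decomposition, same cost).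

-- ===== PORT A =====
-- loop body of A's 'for line in y_edges' (dict: key ↦ (max_z, line))
def pvStepA (best_by_xy : PySem.Dict (List Int × List Int) (Int × ((Int × Int × Int) × (Int × Int × Int))))
    (line : (Int × Int × Int) × (Int × Int × Int)) :
    PySem.Dict (List Int × List Int) (Int × ((Int × Int × Int) × (Int × Int × Int))) :=
  let x_key := PySem.List.sorted [line.1.1, line.2.1] (fun x => x) false
  let y_key := PySem.List.sorted [line.1.2.1, line.2.2.1] (fun x => x) false
  let key := (x_key, y_key)
  let max_z := max line.1.2.2 line.2.2.2
  match best_by_xy.get? key with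
  | none => best_by_xy.insert key (max_z, line)
  | some item => if max_z > item.1 then best_by_xy.insert key (max_z, line) else best_by_xy

def y_edges_process (y_edges : List ((Int × Int × Int) × (Int × Int × Int))) : List ((Int × Int × Int) × (Int × Int × Int)) :=
  let best_by_xy := y_edges.foldl pvStepA PySem.Dict.empty
  best_by_xy.values.map (fun item => item.2)

-- ===== PORT B =====
-- B's key and z-score helpers (the lambda 'max(l[0][2], l[1][2])' and the key expression)
def pvKey (line : (Int × Int × Int) × (Int × Int × Int)) : List Int × List Int :=
  (PySem.List.sorted [line.1.1, line.2.1] (fun x => x) false,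
   PySem.List.sorted [line.1.2.1, line.2.2.1] (fun x => x) false)

def pvZ (line : (Int × Int × Int) × (Int × Int × Int)) : Int := max line.1.2.2 line.2.2.2

-- loop body of B's grouping pass: groups.setdefault(key, []).append(line)
def pvStepB (groups : PySem.Dict (List Int × List Int) (List ((Int × Int × Int) × (Int × Int × Int))))
    (line : (Int × Int × Int) × (Int × Int × Int)) :
    PySem.Dict (List Int × List Int) (List ((Int × Int × Int) × (Int × Int × Int))) :=
  groups.modify (pvKey line) [] (fun b => b ++ [line])

def y_edges_process_alt (y_edges : List ((Int × Int × Int) × (Int × Int × Int))) : List ((Int × Int × Int) × (Int × Int × Int)) :=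
  let groups := y_edges.foldl pvStepB PySem.Dict.empty
  -- each bucket is non-empty, so max? is always 'some'; filterMap ports the comprehension
  groups.values.filterMap (fun bucket => PySem.List.max? bucket pvZ)

-- ===== PRECONDITION & SPEC =====
def Spec_y_edges_process (y_edges : List ((Int × Int × Int) × (Int × Int × Int))) (out : List ((Int × Int × Int) × (Int × Int × Int))) : Prop := out = y_edges_process_alt y_edges
instance (y_edges : List ((Int × Int × Int) × (Int × Int × Int))) (out : List ((Int × Int × Int) × (Int × Int × Int))) : Decidable (Spec_y_edges_process y_edges out) := by unfold Spec_y_edges_process; infer_instance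

-- ===== CLAIM (what is proved, stated in full; the proofs are below) =====
def Claim_equal_y_edges_process : Prop := ∀ (y_edges : List ((Int × Int × Int) × (Int × Int × Int))), Dom_y_edges_process y_edges → Spec_y_edges_process y_edges (y_edges_process y_edges)

-- ===== LEMMAS AND PROOFS =====

-- value A keeps for a key, expressed from B's bucket for that key
def pvBest (b : List ((Int × Int × Int) × (Int × Int × Int))) : Int × ((Int × Int × Int) × (Int × Int × Int)) :=
  match PySem.List.max? b pvZ with
  | some m => (pvZ m, m)
  | none => (0, ((0, 0, 0), (0, 0, 0)))

def pvDflt : Int × ((Int × Int × Int) × (Int × Int × Int)) := (0, ((0, 0, 0), (0, 0, 0)))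

-- invariant tying A's dict to B's groups dict
def pvRel (d : PySem.Dict (List Int × List Int) (Int × ((Int × Int × Int) × (Int × Int × Int))))
    (g : PySem.Dict (List Int × List Int) (List ((Int × Int × Int) × (Int × Int × Int)))) : Prop :=
  d.keys = g.keys ∧ g.keys.Nodup ∧
  (∀ k ∈ g.keys, g.getD k [] ≠ []) ∧
  (∀ k, d.getD k pvDflt = pvBest (g.getD k []))

lemma pvMax?_append (b : List ((Int × Int × Int) × (Int × Int × Int))) (x : (Int × Int × Int) × (Int × Int × Int)) :
    PySem.List.max? (b ++ [x]) pvZ =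
      match PySem.List.max? b pvZ with
      | none => some x
      | some m => if pvZ m < pvZ x then some x else some m := by
  unfold PySem.List.max?
  rw [List.foldl_append]
  generalize (List.foldl _ none b : Option ((Int × Int × Int) × (Int × Int × Int))) = acc
  cases acc <;> rfl

lemma pvMax?_some (b : List ((Int × Int × Int) × (Int × Int × Int))) (h : b ≠ []) :
    ∃ m, PySem.List.max? b pvZ = some m := by
  cases hmm : PySem.List.max? b pvZ with
  | none => exact absurd ((PySem.List.max?_eq_none_iff _ _).mp hmm) h
  | some m => exact ⟨m, rfl⟩

lemma pvRel_step (d : PySem.Dict (List Int × List Int) (Int × ((Int × Int × Int) × (Int × Int × Int))))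
    (g : PySem.Dict (List Int × List Int) (List ((Int × Int × Int) × (Int × Int × Int))))
    (line : (Int × Int × Int) × (Int × Int × Int)) (h : pvRel d g) :
    pvRel (pvStepA d line) (pvStepB g line) := by
  obtain ⟨hk, hnd, hne, hv⟩ := h
  have hA : pvStepA d line =
      (match d.get? (pvKey line) with
       | none => d.insert (pvKey line) (pvZ line, line)
       | some item => if pvZ line > item.1 then d.insert (pvKey line) (pvZ line, line) else d) := rfl
  have hbucket : ∀ k', (pvStepB g line).getD k' [] =
      if k' = pvKey line then g.getD (pvKey line) [] ++ [line] else g.getD k' [] := by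
    intro k'; simp [pvStepB, PySem.Dict.getD_modify]
  by_cases hc : (pvKey line) ∈ g.keys
  · -- key already present in both dicts
    have hcd : d.contains (pvKey line) = true :=
      (PySem.Dict.contains_iff_mem_keys d _).mpr (hk ▸ hc)
    have hcg : g.contains (pvKey line) = true :=
      (PySem.Dict.contains_iff_mem_keys g _).mpr hc
    obtain ⟨m, hm⟩ := pvMax?_some _ (hne _ hc)
    have hdval : d.getD (pvKey line) pvDflt = (pvZ m, m) := by
      rw [hv]; simp [pvBest, hm]
    have hget : d.get? (pvKey line) = some (pvZ m, m) := by
      cases hg2 : d.get? (pvKey line) with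
      | none => simp [PySem.Dict.contains_eq_isSome_get?, hg2] at hcd
      | some it =>
          have h2 := PySem.Dict.getD_of_get?_eq_some _ pvDflt hg2
          rw [hdval] at h2
          exact congrArg some h2.symm
    have hkeysB : (pvStepB g line).keys = g.keys := by
      rw [pvStepB, PySem.Dict.keys_modify, PySem.Dict.keys_insert_of_contains _ _ hcg]
    have hRHS : pvBest (g.getD (pvKey line) [] ++ [line]) =
        if pvZ m < pvZ line then (pvZ line, line) else (pvZ m, m) := by
      unfold pvBest
      rw [pvMax?_append, hm]
      dsimp only
      split_ifs <;> rfl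
    refine ⟨?_, hkeysB ▸ hnd, ?_, ?_⟩
    · rw [hA, hget]
      dsimp only
      split_ifs
      · rw [PySem.Dict.keys_insert_of_contains _ _ hcd, hkeysB, hk]
      · rw [hkeysB, hk]
    · intro k hkmem
      rw [hbucket]; split_ifs with he
      · simp
      · exact hne k (hkeysB ▸ hkmem)
    · intro k'
      rw [hA, hget]
      dsimp only
      by_cases he : k' = pvKey line
      · subst he
        rw [hbucket, if_pos rfl, hRHS]
        split_ifs with hgt
        · rw [PySem.Dict.getD_insert_self]
        · rw [hdval]
      · rw [hbucket, if_neg he]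
        split_ifs <;> [rw [PySem.Dict.getD_insert, if_neg he, hv k']; rw [hv k']]
  · -- fresh key: A inserts, B starts the bucket [line]
    have hcd : d.contains (pvKey line) = false := by
      rw [← Bool.not_eq_true]
      simpa [PySem.Dict.contains_iff_mem_keys, hk] using hc
    have hcg : g.contains (pvKey line) = false := by
      rw [← Bool.not_eq_true]
      simpa [PySem.Dict.contains_iff_mem_keys] using hc
    have hget : d.get? (pvKey line) = none := by
      cases hg2 : d.get? (pvKey line) with
      | none => rfl
      | some it => simp [PySem.Dict.contains_eq_isSome_get?, hg2] at hcd
    have hgabs : g.getD (pvKey line) [] = [] := PySem.Dict.getD_of_not_contains _ _ hcg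
    have hkeysB : (pvStepB g line).keys = g.keys ++ [pvKey line] := by
      rw [pvStepB, PySem.Dict.keys_modify, PySem.Dict.keys_insert_of_not_contains _ _ hcg]
    refine ⟨?_, ?_, ?_, ?_⟩
    · rw [hA, hget]
      dsimp only
      rw [PySem.Dict.keys_insert_of_not_contains _ _ hcd, hkeysB, hk]
    · rw [hkeysB]
      exact List.Nodup.append hnd (List.nodup_singleton _)
        (by intro a ha hb; rw [List.mem_singleton] at hb; subst hb; exact hc ha)
    · intro k hkmem
      rw [hbucket]; split_ifs with he
      · simp
      · rw [hkeysB] at hkmem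
        rcases List.mem_append.mp hkmem with h1 | h1
        · exact hne k h1
        · rw [List.mem_singleton] at h1; exact absurd h1 he
    · intro k'
      rw [hA, hget]
      dsimp only
      by_cases he : k' = pvKey line
      · subst he
        rw [hbucket, if_pos rfl, hgabs, PySem.Dict.getD_insert_self]
        simp [pvBest, PySem.List.max?]
      · rw [hbucket, if_neg he, PySem.Dict.getD_insert, if_neg he, hv k']

lemma pvRel_foldl (l : List ((Int × Int × Int) × (Int × Int × Int)))
    (d : PySem.Dict (List Int × List Int) (Int × ((Int × Int × Int) × (Int × Int × Int))))
    (g : PySem.Dict (List Int × List Int) (List ((Int × Int × Int) × (Int × Int × Int))))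
    (h : pvRel d g) : pvRel (l.foldl pvStepA d) (l.foldl pvStepB g) := by
  induction l generalizing d g with
  | nil => exact h
  | cons x t ih => exact ih _ _ (pvRel_step d g x h)

lemma pvFilterMap_eq_map (ks : List (List Int × List Int))
    (g : PySem.Dict (List Int × List Int) (List ((Int × Int × Int) × (Int × Int × Int))))
    (h : ∀ k ∈ ks, g.getD k [] ≠ []) :
    (ks.map (fun k => g.getD k [])).filterMap (fun b => PySem.List.max? b pvZ) =
      ks.map (fun k => (pvBest (g.getD k [])).2) := by
  induction ks with
  | nil => rfl
  | cons k t ih =>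
      obtain ⟨m, hm⟩ := pvMax?_some _ (h k (List.mem_cons_self ..))
      simp only [List.map_cons, List.filterMap_cons, hm]
      rw [ih (fun k hk => h k (List.mem_cons_of_mem _ hk))]
      simp [pvBest, hm]

-- ===== VERDICT (by name: the statement is the Claim_ definition above) =====
theorem y_edges_process_spec : Claim_equal_y_edges_process := by
  intro y_edges _
  have hAdef : y_edges_process y_edges =
      (y_edges.foldl pvStepA PySem.Dict.empty).values.map (fun item => item.2) := rfl
  have hBdef : y_edges_process_alt y_edges =
      (y_edges.foldl pvStepB PySem.Dict.empty).values.filterMap (fun bucket => PySem.List.max? bucket pvZ) := rfl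
  unfold Spec_y_edges_process
  rw [hAdef, hBdef]
  have h0 : pvRel (PySem.Dict.empty) (PySem.Dict.empty) := by
    refine ⟨rfl, ?_, ?_, ?_⟩ <;>
      simp [PySem.Dict.keys_empty, PySem.Dict.getD_empty, pvBest, PySem.List.max?, pvDflt]
  obtain ⟨hk, hnd, hne, hv⟩ := pvRel_foldl y_edges PySem.Dict.empty PySem.Dict.empty h0
  have hgd : (y_edges.foldl pvStepA PySem.Dict.empty).keys.Nodup := hk ▸ hnd
  rw [PySem.Dict.values_eq_map_keys _ hgd pvDflt,
      PySem.Dict.values_eq_map_keys _ hnd ([]),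
      pvFilterMap_eq_map _ _ hne, hk, List.map_map]
  exact List.map_congr_left (fun k _ => by simp [hv k])
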